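-- pv_equiv track=rewrite | github.com/ashokpv/spark-real-streaming | final/dlink_pattern_matcher_v3.py | choose_mode_pattern
-- ===== SOURCE A (Python) =====
-- def choose_mode_pattern(generated_patterns):
-- 	hsh = {}
-- 	for pattern in generated_patterns:
-- 		if(pattern['link'] in hsh):
-- 			hsh[pattern['link']] += 1
-- 		else:
-- 			hsh[pattern['link']] = 1
--
-- 	mode_pattern_link = max(hsh, key = hsh.get)
--
-- 	for pattern in generated_patterns:
-- 		if(pattern['link'] == mode_pattern_link):
-- 			return pattern
-- ===== SOURCE B (Python) =====
-- def choose_mode_pattern(generated_patterns):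
--     index = {}
--     for pattern in generated_patterns:
--         link = pattern['link']
--         if link in index:
--             count, first = index[link]
--             index[link] = (count + 1, first)
--         else:
--             index[link] = (1, pattern)
--     count, first = max(index.values(), key=lambda v: v[0])
--     return first
-- ===== Notes on version B (the rewrite author's own statement) =====
-- stated objective: simpler
-- what changed: A single pass builds a dict mapping link -> (count, first pattern with that link), replacing A's separate counting pass, max over keys and final rescan pass with one index-building pass plus one max over the dict's values.
import Mathlib
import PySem

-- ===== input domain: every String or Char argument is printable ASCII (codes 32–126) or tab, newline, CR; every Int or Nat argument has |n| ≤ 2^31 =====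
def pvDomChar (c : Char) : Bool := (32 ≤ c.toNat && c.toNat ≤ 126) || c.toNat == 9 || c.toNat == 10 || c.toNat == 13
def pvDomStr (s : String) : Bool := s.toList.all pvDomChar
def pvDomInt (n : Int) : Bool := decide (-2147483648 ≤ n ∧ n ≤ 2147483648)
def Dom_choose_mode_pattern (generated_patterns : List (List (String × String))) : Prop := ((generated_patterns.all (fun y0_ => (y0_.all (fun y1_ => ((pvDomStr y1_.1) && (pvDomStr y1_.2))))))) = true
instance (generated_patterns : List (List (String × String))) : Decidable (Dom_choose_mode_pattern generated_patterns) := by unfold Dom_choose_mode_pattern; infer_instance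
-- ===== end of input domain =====

-- B builds, in one pass, a dict link -> (count, first pattern with that link) and then takes one max
-- over its values, replacing A's three traversals (count pass, max over keys, rescan pass).
-- Return-value equivalence; neither version mutates its argument.

-- pattern['link'] : dict lookup on the association list (a missing key = KeyError is excluded by Pre_)
def pvLink (p : List (String × String)) : String :=
  ((PySem.Dict.mk p).get? "link").getD ""

-- ===== PORT A =====
-- the body of A's first loop: count occurrences of each link
def pvStepA (h : PySem.Dict String Int) (pattern : List (String × String)) : PySem.Dict String Int :=
  if h.contains (pvLink pattern) then h.modify (pvLink pattern) 0 (· + 1)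
  else h.insert (pvLink pattern) 1

def choose_mode_pattern (generated_patterns : List (List (String × String))) : List (String × String) :=
  let hsh : PySem.Dict String Int := generated_patterns.foldl pvStepA PySem.Dict.empty
  -- max(hsh, key = hsh.get): first key of maximal count (ValueError on an empty dict, excluded by Pre_)
  match PySem.List.max? hsh.keys (fun k => hsh.getD k 0) with
  | none => []
  | some mode_pattern_link =>
    -- second loop: return the first pattern whose link equals mode_pattern_link
    match generated_patterns.find? (fun pattern => pvLink pattern == mode_pattern_link) with
    | some pattern => pattern
    | none => []   -- Python's implicit None; unreachable since the mode link occurs in the list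

-- ===== PORT B =====
-- the body of B's single loop: index link -> (count, first pattern with that link)
def pvStepB (d : PySem.Dict String (Int × List (String × String)))
    (pattern : List (String × String)) : PySem.Dict String (Int × List (String × String)) :=
  match d.get? (pvLink pattern) with
  | some (count, first) => d.insert (pvLink pattern) (count + 1, first)
  | none => d.insert (pvLink pattern) (1, pattern)

def choose_mode_pattern_alt (generated_patterns : List (List (String × String))) : List (String × String) :=
  let index := generated_patterns.foldl pvStepB PySem.Dict.empty
  match PySem.List.max? index.values (fun v => v.1) with
  | none => []   -- max raises ValueError on an empty dict, excluded by Pre_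
  | some v => v.2

-- ===== PRECONDITION & SPEC =====
-- Pre_ excludes: the empty list (A's max raises ValueError); patterns missing a 'link' key (KeyError);
-- and patterns with duplicate keys, which a Python dict cannot represent (dict(pairs) keeps only the
-- last value per key, so the association-list representation of such an input is not faithful).
def Pre_choose_mode_pattern (generated_patterns : List (List (String × String))) : Prop :=
  generated_patterns ≠ [] ∧
  ∀ p ∈ generated_patterns, "link" ∈ p.map Prod.fst ∧ (p.map Prod.fst).Nodup
instance (generated_patterns : List (List (String × String))) : Decidable (Pre_choose_mode_pattern generated_patterns) := by unfold Pre_choose_mode_pattern; infer_instance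

def pvWitness_choose_mode_pattern : (List (List (String × String))) :=
  [[("link", "a"), ("t", "x")], [("link", "b")], [("link", "a"), ("t", "y")]]

def Spec_choose_mode_pattern (generated_patterns : List (List (String × String))) (out : List (String × String)) : Prop := out = choose_mode_pattern_alt generated_patterns
instance (generated_patterns : List (List (String × String))) (out : List (String × String)) : Decidable (Spec_choose_mode_pattern generated_patterns out) := by unfold Spec_choose_mode_pattern; infer_instance

-- ===== CLAIM (what is proved, stated in full; the proofs are below) =====
def Claim_equal_choose_mode_pattern : Prop := ∀ (generated_patterns : List (List (String × String))), Dom_choose_mode_pattern generated_patterns → Pre_choose_mode_pattern generated_patterns → Spec_choose_mode_pattern generated_patterns (choose_mode_pattern generated_patterns)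

-- ===== LEMMAS AND PROOFS =====

def pvF (it : String × (Int × List (String × String))) : String × Int := (it.1, it.2.1)

lemma pv_loop (gps : List (List (String × String))) (rest : List (List (String × String))) :
    ∀ (pre : List (List (String × String)))
      (h : PySem.Dict String Int) (d : PySem.Dict String (Int × List (String × String))),
      gps = pre ++ rest →
      h.items = d.items.map pvF →
      (d.items.map Prod.fst).Nodup →
      (∀ it ∈ d.items, gps.find? (fun p => pvLink p == it.1) = some it.2.2) →
      (∀ l, (d.items.any (fun q => q.1 == l)) = true ↔ l ∈ pre.map pvLink) →
      (rest.foldl pvStepA h).items = (rest.foldl pvStepB d).items.map pvF ∧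
      ((rest.foldl pvStepB d).items.map Prod.fst).Nodup ∧
      (∀ it ∈ (rest.foldl pvStepB d).items, gps.find? (fun p => pvLink p == it.1) = some it.2.2) ∧
      (∀ l, ((rest.foldl pvStepB d).items.any (fun q => q.1 == l)) = true ↔ l ∈ gps.map pvLink) := by
  induction rest with
  | nil =>
    intro pre h d hsplit h1 h2 h3 h4
    subst hsplit
    refine ⟨h1, h2, h3, ?_⟩
    simpa using h4
  | cons p t ih =>
    intro pre h d hsplit h1 h2 h3 h4
    set l := pvLink p with hl
    -- A's and B's membership tests agree
    have hcont : h.contains l = d.items.any (fun q => q.1 == l) := by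
      simp only [PySem.Dict.contains, h1, List.any_map]
      exact List.any_congr rfl (fun q => by simp [pvF, Function.comp])
    by_cases hc : d.items.any (fun q => q.1 == l) = true
    · -- existing link: A bumps the count, B keeps the stored first pattern
      have hfs : (d.items.find? (fun q => q.1 == l)).isSome := by
        rw [List.find?_isSome]; exact List.any_eq_true.mp hc
      obtain ⟨it0, hfind⟩ := Option.isSome_iff_exists.mp hfs
      obtain ⟨k0, c, fp⟩ := it0
      have hit0mem : (k0, c, fp) ∈ d.items := List.mem_of_find?_eq_some hfind
      have hit0l : k0 = l := by
        have := List.find?_some hfind; simpa using this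
      subst hit0l
      have hget : d.get? l = some (c, fp) := by
        simp [PySem.Dict.get?, hfind]
      have hhfind : h.items.find? (fun q => q.1 == l) = some (l, c) := by
        rw [h1, List.find?_map]
        have he : ((fun q : String × Int => q.1 == l) ∘ pvF) = (fun q => q.1 == l) := by
          funext q; simp [pvF]
        rw [he, hfind]; rfl
      have hgeth : h.getD l 0 = c := by
        simp [PySem.Dict.getD, PySem.Dict.get?, hhfind]
      have hcontd : d.contains l = true := hc
      have hconth : h.contains l = true := by rw [hcont]; exact hc
      have hBstep : pvStepB d p = PySem.Dict.mk (d.items.map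
          (fun q => if q.1 == l then (l, (c + 1, fp)) else q)) := by
        show (match d.get? (pvLink p) with
          | some (count, first) => d.insert (pvLink p) (count + 1, first)
          | none => d.insert (pvLink p) (1, p)) = _
        rw [← hl, hget]
        show d.insert l (c + 1, fp) = _
        simp [PySem.Dict.insert, hcontd]
      have hAstep : pvStepA h p = PySem.Dict.mk (h.items.map
          (fun q => if q.1 == l then (l, c + 1) else q)) := by
        show (if h.contains (pvLink p) then h.modify (pvLink p) 0 (· + 1)
          else h.insert (pvLink p) 1) = _
        rw [← hl, if_pos (by rw [hconth])]
        show h.insert l (h.getD l 0 + 1) = _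
        rw [hgeth]
        simp [PySem.Dict.insert, hconth]
      simp only [List.foldl_cons, hAstep, hBstep]
      apply ih (pre ++ [p])
      · rw [hsplit]; simp
      · -- h1'
        show (h.items.map _ : List (String × Int)) = _
        rw [h1, List.map_map, List.map_map]
        apply List.map_congr_left
        intro q _
        by_cases hq : q.1 == l
        · simp [Function.comp, pvF, hq]
        · simp [Function.comp, pvF, hq]
      · -- h2'
        have : (d.items.map (fun q => if q.1 == l then (l, (c + 1, fp)) else q)).map Prod.fst
            = d.items.map Prod.fst := by
          rw [List.map_map]
          apply List.map_congr_left
          intro q _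
          by_cases hq : q.1 == l
          · simp only [Function.comp_apply, hq, if_pos]
            exact (eq_of_beq hq).symm
          · simp [Function.comp, hq]
        show ((d.items.map _).map Prod.fst).Nodup
        rw [this]; exact h2
      · -- h3'
        intro it hit
        obtain ⟨q, hq, rfl⟩ := List.mem_map.mp hit
        by_cases hq1 : q.1 == l
        · simp only [hq1, if_pos]
          have := h3 (l, c, fp) hit0mem
          simpa using this
        · simp only [hq1, if_neg, Bool.false_eq_true, not_false_iff]
          exact h3 q hq
      · -- h4'
        intro x
        have hany : ((d.items.map (fun q => if q.1 == l then (l, (c + 1, fp)) else q)).any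
            (fun q => q.1 == x)) = d.items.any (fun q => q.1 == x) := by
          rw [List.any_map]
          apply List.any_congr rfl
          intro q
          by_cases hq : q.1 == l
          · simp only [Function.comp_apply, hq, if_pos]
            rw [eq_of_beq hq]
          · simp [Function.comp, hq]
        show ((d.items.map _).any _) = true ↔ x ∈ (pre ++ [p]).map pvLink
        rw [hany, h4]
        simp only [List.map_append, List.map_cons, List.map_nil, List.mem_append,
          List.mem_cons, List.not_mem_nil, or_false]
        constructor
        · exact Or.inl
        · rintro (hx | hx)
          · exact hx
          · rw [hx, ← hl]; exact (h4 l).mp hc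
    · -- new link: both append an entry; B stores the current pattern as the first one
      have hnotin : l ∉ pre.map pvLink := fun hmem => hc ((h4 l).mpr hmem)
      have hfn : d.items.find? (fun q => q.1 == l) = none := by
        rw [List.find?_eq_none]
        intro x hx hpx
        exact hc (List.any_eq_true.mpr ⟨x, hx, hpx⟩)
      have hget : d.get? l = none := by
        simp [PySem.Dict.get?, hfn]
      have hcontd : d.contains l = false := by
        show (d.items.any fun q => q.1 == l) = false
        exact eq_false_of_ne_true hc
      have hconth : h.contains l = false := by rw [hcont]; exact hcontd
      have hBstep : pvStepB d p = PySem.Dict.mk (d.items ++ [(l, (1, p))]) := by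
        show (match d.get? (pvLink p) with
          | some (count, first) => d.insert (pvLink p) (count + 1, first)
          | none => d.insert (pvLink p) (1, p)) = _
        rw [← hl, hget]
        show d.insert l (1, p) = _
        simp [PySem.Dict.insert, hcontd]
      have hAstep : pvStepA h p = PySem.Dict.mk (h.items ++ [(l, (1 : Int))]) := by
        show (if h.contains (pvLink p) then h.modify (pvLink p) 0 (· + 1)
          else h.insert (pvLink p) 1) = _
        rw [← hl, if_neg (by rw [hconth]; exact Bool.false_ne_true)]
        simp [PySem.Dict.insert, hconth]
      simp only [List.foldl_cons, hAstep, hBstep]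
      apply ih (pre ++ [p])
      · rw [hsplit]; simp
      · -- h1'
        show (h.items ++ [(l, (1 : Int))] : List (String × Int)) = _
        rw [h1, List.map_append]
        rfl
      · -- h2'
        show ((d.items ++ [(l, (1, p))]).map Prod.fst).Nodup
        rw [List.map_append]
        simp only [List.map_cons, List.map_nil]
        rw [List.nodup_append]
        refine ⟨h2, List.nodup_singleton _, ?_⟩
        intro x hx y hy
        have hyl : y = l := by simpa using hy
        obtain ⟨q, hq, hq1⟩ := List.mem_map.mp hx
        intro hxy
        exact hc (List.any_eq_true.mpr ⟨q, hq, by simp [hq1, hxy, hyl]⟩)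
      · -- h3'
        intro it hit
        rw [List.mem_append] at hit
        rcases hit with hit | hit
        · exact h3 it hit
        · simp only [List.mem_singleton] at hit
          subst hit
          show gps.find? (fun q => pvLink q == l) = some p
          rw [hsplit, List.find?_append]
          have hpre : pre.find? (fun q => pvLink q == l) = none := by
            rw [List.find?_eq_none]
            intro x hx hpx
            exact hnotin (List.mem_map.mpr ⟨x, hx, eq_of_beq hpx⟩)
          rw [hpre]
          simp only [Option.none_or]
          rw [List.find?_cons_of_pos]
          simp [hl]
      · -- h4'
        intro x
        show ((d.items ++ [(l, (1, p))]).any (fun q => q.1 == x)) = true ↔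
          x ∈ (pre ++ [p]).map pvLink
        rw [List.any_append]
        simp only [List.any_cons, List.any_nil, Bool.or_false, Bool.or_eq_true, h4 x,
          List.map_append, List.map_cons, List.map_nil, List.mem_append, List.mem_cons,
          List.not_mem_nil, or_false, beq_iff_eq]
        constructor
        · rintro (hx | hx)
          · exact Or.inl hx
          · exact Or.inr (hl ▸ hx.symm)
        · rintro (hx | hx)
          · exact Or.inl hx
          · exact Or.inr (by rw [hx, hl])


lemma pv_max?_map_aux {α β κ : Type} [LT κ] [DecidableLT κ] (g : α → β) (key : β → κ)
    (xs : List α) : ∀ (acc : Option α),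
    (xs.map g).foldl (fun acc x => match acc with
      | none => some x
      | some m => if key m < key x then some x else some m) (acc.map g)
    = ((xs.foldl (fun acc x => match acc with
      | none => some x
      | some m => if key (g m) < key (g x) then some x else some m) acc).map g) := by
  induction xs with
  | nil => intro acc; rfl
  | cons x t ih =>
    intro acc
    have hstep : (match acc.map g with
        | none => some (g x)
        | some m => if key m < key (g x) then some (g x) else some m)
      = (match acc with
        | none => some x
        | some m => if key (g m) < key (g x) then some x else some m).map g := by
      cases acc with
      | none => rfl
      | some m => by_cases hlt : key (g m) < key (g x) <;> simp [hlt]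
    simp only [List.map_cons, List.foldl_cons, hstep, ih]

lemma pv_max?_map {α β κ : Type} [LT κ] [DecidableLT κ] (g : α → β) (key : β → κ)
    (xs : List α) :
    PySem.List.max? (xs.map g) key = Option.map g (PySem.List.max? xs (fun x => key (g x))) := by
  have := pv_max?_map_aux g key xs none
  simpa [PySem.List.max?] using this

lemma pv_max?_congr_aux {α κ : Type} [LT κ] [DecidableLT κ] (xs : List α) (k1 k2 : α → κ)
    (hk : ∀ x ∈ xs, k1 x = k2 x) : ∀ (acc : Option α),
    (∀ m, acc = some m → k1 m = k2 m) →
    xs.foldl (fun acc x => match acc with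
      | none => some x
      | some m => if k1 m < k1 x then some x else some m) acc
    = xs.foldl (fun acc x => match acc with
      | none => some x
      | some m => if k2 m < k2 x then some x else some m) acc := by
  induction xs with
  | nil => intro acc _; rfl
  | cons x t ih =>
    intro acc hacc
    have hx : k1 x = k2 x := hk x (by simp)
    have ht : ∀ y ∈ t, k1 y = k2 y := fun y hy => hk y (by simp [hy])
    cases acc with
    | none =>
      simp only [List.foldl_cons]
      exact ih ht (some x) (by intro m hm; cases hm; exact hx)
    | some m =>
      have hm : k1 m = k2 m := hacc m rfl
      simp only [List.foldl_cons, hm, hx]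
      by_cases hlt : k2 m < k2 x
      · simp [hlt]; exact ih ht (some x) (by intro m' hm'; cases hm'; exact hx)
      · simp [hlt]; exact ih ht (some m) (by intro m' hm'; cases hm'; exact hm)

lemma pv_max?_congr {α κ : Type} [LT κ] [DecidableLT κ] (xs : List α) (k1 k2 : α → κ)
    (hk : ∀ x ∈ xs, k1 x = k2 x) :
    PySem.List.max? xs k1 = PySem.List.max? xs k2 := by
  exact pv_max?_congr_aux xs k1 k2 hk none (by intro m hm; cases hm)


theorem pv_final (gps : List (List (String × String))) (hne : gps ≠ []) :
    choose_mode_pattern gps = choose_mode_pattern_alt gps := by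
  obtain ⟨h1, h2, h3, h4⟩ := pv_loop gps gps [] PySem.Dict.empty PySem.Dict.empty
    (by simp) (by rfl) (by simp [PySem.Dict.empty]) (by simp [PySem.Dict.empty]) (by simp [PySem.Dict.empty])
  set idx := gps.foldl pvStepB PySem.Dict.empty with hidx
  set hsh := gps.foldl pvStepA PySem.Dict.empty with hhsh
  -- keys of A's dict = keys of B's index
  have hkeys : hsh.keys = idx.items.map Prod.fst := by
    show hsh.items.map Prod.fst = _
    rw [h1, List.map_map]
    apply List.map_congr_left
    intro q _
    simp [pvF]
  -- the index is nonempty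
  have hne' : idx.items ≠ [] := by
    obtain ⟨p0, t0, rfl⟩ := List.exists_cons_of_ne_nil hne
    intro hemp
    have := (h4 (pvLink p0)).mpr (by simp)
    rw [hemp] at this
    simp at this
  -- A's max over keys = fst of the max over items
  have hAmax : PySem.List.max? hsh.keys (fun k => hsh.getD k 0)
      = Option.map Prod.fst (PySem.List.max? idx.items (fun it => it.2.1)) := by
    rw [hkeys, pv_max?_map]
    congr 1
    apply pv_max?_congr
    intro it hit
    have hmem : (it.1, it.2.1) ∈ hsh.items := by
      rw [h1]; exact List.mem_map.mpr ⟨it, hit, rfl⟩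
    have hnd : hsh.keys.Nodup := by rw [hkeys]; exact h2
    exact PySem.Dict.getD_of_mem_items hsh hmem hnd 0
  -- B's max over values = snd of the max over items
  have hBmax : PySem.List.max? idx.values (fun v => v.1)
      = Option.map Prod.snd (PySem.List.max? idx.items (fun it => it.2.1)) := by
    show PySem.List.max? (idx.items.map Prod.snd) _ = _
    rw [pv_max?_map]
  obtain ⟨it, hit⟩ : ∃ it, PySem.List.max? idx.items (fun it => it.2.1) = some it := by
    cases hM : PySem.List.max? idx.items (fun it => it.2.1) with
    | none => exact absurd ((PySem.List.max?_eq_none_iff _ _).mp hM) hne'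
    | some it => exact ⟨it, rfl⟩
  have hitmem : it ∈ idx.items := PySem.List.max?_mem hit
  have hfind := h3 it hitmem
  show (match PySem.List.max? hsh.keys (fun k => hsh.getD k 0) with
    | none => []
    | some mode_pattern_link =>
      match gps.find? (fun pattern => pvLink pattern == mode_pattern_link) with
      | some pattern => pattern
      | none => []) =
    (match PySem.List.max? idx.values (fun v => v.1) with
    | none => ([] : List (String × String))
    | some v => v.2)
  rw [hAmax, hBmax, hit]
  simp only [Option.map_some]
  rw [hfind]

-- ===== VERDICT (by name: the statement is the Claim_ definition above) =====
theorem choose_mode_pattern_spec : Claim_equal_choose_mode_pattern := by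
  intro gps _ hpre
  show choose_mode_pattern gps = choose_mode_pattern_alt gps
  exact pv_final gps hpre.1
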